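-- pv_equiv track=rewrite | github.com/Dantos7/advent-of-code-2024-solutions | src/aoc/09.py | move_blocks_from_right
-- ===== SOURCE A (Python) =====
-- def move_blocks_from_right(explicit_line: list[str]) -> list[str]:
--     """Move blocks from right to left."""
--     i = 0
--     j = len(explicit_line) - 1
--     while i < j:
--         # Move i pointer to the first empty space
--         while explicit_line[i] != "." and i < j:
--             i += 1
--         # Move j pointer to the first non-empty space
--         while explicit_line[j] == "." and i < j:
--             j -= 1
--
--         if explicit_line[i] == "." and explicit_line[j] != "." and i != j:
--             explicit_line[i] = explicit_line[j]
--             explicit_line[j] = "."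
--         j -= 1
--         i += 1
--
--     return explicit_line
-- ===== SOURCE B (Python) =====
-- def move_blocks_from_right(explicit_line: list[str]) -> list[str]:
--     """Move blocks from right to left."""
--     m = sum(1 for x in explicit_line if x != ".")
--     movers = [x for x in explicit_line[m:] if x != "."]
--     built = []
--     for p in range(m):
--         x = explicit_line[p]
--         built.append(x if x != "." else movers.pop())
--     built.extend("." for _ in range(len(explicit_line) - m))
--     explicit_line[:] = built
--     return explicit_line
-- ===== Notes on version B (the rewrite author's own statement) =====
-- stated objective: alternative
-- what changed: A compacts in place with two index pointers scanning toward each other in nested while-loops; B instead counts the blocks m, collects the blocks lying beyond position m, and rebuilds the list in one pass over the first m cells (filling each gap by popping the rightmost collected block) followed by a dot pad, writing the result back in place.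
import Mathlib
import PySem

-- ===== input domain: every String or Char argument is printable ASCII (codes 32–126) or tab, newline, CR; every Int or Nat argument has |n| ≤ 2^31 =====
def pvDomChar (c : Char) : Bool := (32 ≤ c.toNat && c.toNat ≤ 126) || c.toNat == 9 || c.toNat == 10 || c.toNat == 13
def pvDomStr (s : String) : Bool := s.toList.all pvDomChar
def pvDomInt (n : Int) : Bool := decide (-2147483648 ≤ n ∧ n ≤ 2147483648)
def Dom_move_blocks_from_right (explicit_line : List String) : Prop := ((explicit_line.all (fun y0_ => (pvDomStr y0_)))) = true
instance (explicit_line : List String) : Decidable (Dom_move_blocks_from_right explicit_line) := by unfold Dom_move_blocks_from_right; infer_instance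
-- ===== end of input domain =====

-- B replaces A's in-place two-pointer while-loops by counting the blocks and rebuilding the
-- list in one pass (objective: alternative decomposition, same asymptotic cost).
-- Both A and B mutate the argument list in place in Python (B via `explicit_line[:] = built`);
-- the equivalence proved here is about the RETURN value (which is that same list).

-- ===== PORT A =====
-- explicit_line[p]  (always called with 0 ≤ p < len during A's execution)
def getl (l : List String) (p : Int) : String := PySem.List.pyGetD l p ""

-- while explicit_line[i] != "." and i < j: i += 1
def advI (l : List String) (j i : Int) : Int :=
  if h : getl l i ≠ "." ∧ i < j then advI l j (i + 1) else i
termination_by (j - i).toNat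
decreasing_by omega

-- while explicit_line[j] == "." and i < j: j -= 1
def advJ (l : List String) (i j : Int) : Int :=
  if h : getl l j = "." ∧ i < j then advJ l i (j - 1) else j
termination_by (j - i).toNat
decreasing_by omega

theorem advI_ge (l : List String) (j i : Int) : i ≤ advI l j i := by
  fun_induction advI l j i with
  | case1 i h ih => omega
  | case2 i h => omega

theorem advI_le (l : List String) (j i : Int) (hij : i ≤ j) : advI l j i ≤ j := by
  fun_induction advI l j i with
  | case1 i h ih => exact ih (by omega)
  | case2 i h => omega

theorem advJ_le (l : List String) (i j : Int) : advJ l i j ≤ j := by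
  fun_induction advJ l i j with
  | case1 j h ih => omega
  | case2 j h => omega

theorem advJ_ge (l : List String) (i j : Int) (hij : i ≤ j) : i ≤ advJ l i j := by
  fun_induction advJ l i j with
  | case1 j h ih => exact ih (by omega)
  | case2 j h => omega

-- the outer while-loop of A
def loopA (l : List String) (i j : Int) : List String :=
  if h : i < j then
    let i' := advI l j i
    let j' := advJ l i' j
    if getl l i' = "." ∧ getl l j' ≠ "." ∧ i' ≠ j' then
      loopA (PySem.List.pySetD (PySem.List.pySetD l i' (getl l j')) j' ".") (i' + 1) (j' - 1)
    else
      loopA l (i' + 1) (j' - 1)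
  else l
termination_by (j - i).toNat
decreasing_by
  · have h1 := advI_ge l j i
    have h2 := advI_le l j i (le_of_lt h)
    have h3 := advJ_le l (advI l j i) j
    have h4 := advJ_ge l (advI l j i) j h2
    omega
  · have h1 := advI_ge l j i
    have h2 := advI_le l j i (le_of_lt h)
    have h3 := advJ_le l (advI l j i) j
    have h4 := advJ_ge l (advI l j i) j h2
    omega

def move_blocks_from_right (explicit_line : List String) : List String :=
  loopA explicit_line 0 ((explicit_line.length : Int) - 1)

-- ===== PORT B =====
-- transliteration of Source B: count blocks, collect the movers beyond position m,
-- build the result in one pass over range(m), pad with dots, return.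
-- body of Source B's for-loop: st = (built so far, movers left); p the running index
def stepB (explicit_line : List String) (st : List String × List String) (p : Int) : List String × List String :=
  let x := PySem.List.pyGetD explicit_line p ""
  if x ≠ "." then (st.1 ++ [x], st.2)
  else
    match PySem.List.pop? st.2 (-1) with   -- movers.pop()
    | some (b, rest) => (st.1 ++ [b], rest)
    | none => (st.1 ++ [x], st.2)          -- unreachable: a gap before position m leaves a mover

def move_blocks_from_right_alt (explicit_line : List String) : List String :=
  let m : Int := explicit_line.foldl (fun acc x => if x ≠ "." then acc + 1 else acc) 0
  let movers := (PySem.List.slice explicit_line (some m) none).filter (fun x => x ≠ ".")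
  let st := (PySem.List.pyRange 0 m 1).foldl (stepB explicit_line) ([], movers)
  st.1 ++ List.replicate ((explicit_line.length : Int) - m).toNat "."

-- ===== PRECONDITION & SPEC =====
def Spec_move_blocks_from_right (explicit_line : List String) (out : List String) : Prop := out = move_blocks_from_right_alt explicit_line
instance (explicit_line : List String) (out : List String) : Decidable (Spec_move_blocks_from_right explicit_line out) := by unfold Spec_move_blocks_from_right; infer_instance

-- ===== CLAIM (what is proved, stated in full; the proofs are below) =====
def Claim_equal_move_blocks_from_right : Prop := ∀ (explicit_line : List String), Dom_move_blocks_from_right explicit_line → Spec_move_blocks_from_right explicit_line (move_blocks_from_right explicit_line)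

-- ===== LEMMAS AND PROOFS =====

-- the common functional specification: compaction as a structural recursion
def compactRec : List String → List String
  | [] => []
  | a :: t =>
    if a = "." then
      match h : t.getLast? with
      | none => ["."]
      | some c =>
        if c = "." then compactRec ("." :: t.dropLast) ++ ["."]
        else c :: compactRec t.dropLast ++ ["."]
    else a :: compactRec t
termination_by l => l.length
decreasing_by
  · have ht : t ≠ [] := by rintro rfl; simp at h
    have h0 : 0 < t.length := List.length_pos_iff.mpr ht
    simp [List.length_dropLast]; omega
  · simp
  · simp

theorem getl_append (pre : List String) (x : String) (rest : List String) :
    getl (pre ++ x :: rest) (pre.length : Int) = x := by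
  simp [getl, PySem.List.pyGetD_natCast, List.getD]

theorem advI_stop (l : List String) (j i : Int) :
    (∀ p, i ≤ p → p < advI l j i → getl l p ≠ ".") ∧ (advI l j i < j → getl l (advI l j i) = ".") := by
  fun_induction advI l j i with
  | case1 i h ih =>
    refine ⟨?_, ih.2⟩
    intro p hp1 hp2
    rcases eq_or_lt_of_le hp1 with rfl | hlt
    · exact h.1
    · exact ih.1 p (by omega) hp2
  | case2 i h =>
    refine ⟨by intro p h1 h2; omega, ?_⟩
    intro hij
    by_contra hne
    exact h ⟨hne, hij⟩

theorem peel_left (l : List String) (i j : Int) (hij : i < j) (hi : getl l i ≠ ".") :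
    loopA l i j = loopA l (i + 1) j := by
  have hadv : advI l j i = advI l j (i + 1) := by
    conv_lhs => rw [advI]
    simp [hi, hij]
  by_cases h2 : i + 1 < j
  · conv_lhs => rw [loopA]
    conv_rhs => rw [loopA]
    simp only [dif_pos hij, dif_pos h2, hadv]
  · have hj : j = i + 1 := by omega
    have hI : advI l j (i + 1) = i + 1 := by
      rw [advI]; simp [show ¬(getl l (i + 1) ≠ "." ∧ i + 1 < j) from fun hc => absurd hc.2 (by omega)]
    have hJ : advJ l (i + 1) j = j := by
      rw [advJ]; simp [show ¬(getl l j = "." ∧ i + 1 < j) from fun hc => absurd hc.2 (by omega)]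
    conv_lhs => rw [loopA]
    simp only [dif_pos hij, hadv, hI, hJ]
    rw [if_neg (by simp [hj]), loopA, dif_neg (by omega), loopA, dif_neg (by omega)]

theorem peel_right (l : List String) (i j : Int) (hij : i < j) (hj : getl l j = ".") :
    loopA l i j = loopA l i (j - 1) := by
  have hIge := advI_ge l j i
  have hIle := advI_le l j i (le_of_lt hij)
  by_cases hA : advI l j i = j
  · have hnd : ∀ p, i ≤ p → p < j → getl l p ≠ "." := by
      intro p h1 h2; exact (advI_stop l j i).1 p h1 (by omega)
    have hJ1 : advJ l (advI l j i) j = j := by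
      rw [advJ]; exact dif_neg (fun hc => absurd hc.2 (by omega))
    have hL : loopA l i j = l := by
      rw [loopA, dif_pos hij]
      simp only [hJ1]
      simp only [hA]
      rw [if_neg (by simp), loopA, dif_neg (by omega)]
    rw [hL]
    by_cases hE : i = j - 1
    · rw [loopA, dif_neg (by omega)]
    · have hij2 : i < j - 1 := by omega
      have hI2ge := advI_ge l (j-1) i
      have hI2le := advI_le l (j-1) i (by omega)
      have hI2 : advI l (j-1) i = j - 1 := by
        by_contra hne
        have hlt : advI l (j-1) i < j - 1 := by omega
        exact hnd _ hI2ge (by omega) ((advI_stop l (j-1) i).2 hlt)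
      have hJ2 : advJ l (advI l (j-1) i) (j-1) = j - 1 := by
        rw [advJ]; exact dif_neg (fun hc => absurd hc.2 (by omega))
      rw [loopA, dif_pos hij2]
      simp only [hJ2]
      simp only [hI2]
      rw [if_neg (by simp), loopA, dif_neg (by omega)]
  · have hBlt : advI l j i < j := by omega
    have hdot : getl l (advI l j i) = "." := (advI_stop l j i).2 hBlt
    by_cases hE : i = j - 1
    · have hI1 : advI l j i = i := by omega
      have hJ1 : advJ l (advI l j i) j = i := by
        rw [advJ, dif_pos ⟨hj, by omega⟩, hI1, advJ]
        have hnc : ¬(getl l (j - 1) = "." ∧ i < j - 1) := fun hc => absurd hc.2 (by omega)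
        rw [dif_neg hnc]; omega
      rw [loopA, dif_pos hij]
      simp only [hJ1]
      simp only [hI1]
      rw [if_neg (by simp), loopA, dif_neg (by omega), loopA, dif_neg (by omega)]
    · have hij2 : i < j - 1 := by omega
      have hI2 : advI l (j-1) i = advI l j i := by
        have g1 := advI_ge l (j-1) i
        by_contra hne
        rcases lt_or_gt_of_ne hne with hlt | hgt
        · exact (advI_stop l j i).1 _ g1 hlt ((advI_stop l (j-1) i).2 (by omega))
        · exact (advI_stop l (j-1) i).1 _ hIge hgt hdot
      have hJ12 : advJ l (advI l j i) j = advJ l (advI l j i) (j - 1) := by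
        conv_lhs => rw [advJ]
        rw [dif_pos ⟨hj, hBlt⟩]
      rw [loopA, dif_pos hij]
      conv_rhs => rw [loopA]
      rw [dif_pos hij2]
      simp only [hI2, hJ12]

theorem compact_nil : compactRec [] = [] := by rw [compactRec]

theorem compact_cons (a : String) (t : List String) (h : a ≠ ".") :
    compactRec (a :: t) = a :: compactRec t := by rw [compactRec]; simp [h]

theorem compact_single (x : String) : compactRec [x] = [x] := by
  rw [compactRec]; by_cases h : x = "." <;> simp [h, compact_nil]

theorem compact_dot_dot (t₀ : List String) :
    compactRec ("." :: (t₀ ++ ["."])) = compactRec ("." :: t₀) ++ ["."] := by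
  conv_lhs => rw [compactRec.eq_def]
  simp [List.dropLast_concat]
  split
  · rename_i heq; rw [List.getLast?_concat] at heq; cases heq
  · rename_i c' heq
    rw [List.getLast?_concat] at heq
    injection heq with heq'
    simp [← heq']

theorem compact_dot_block (t₀ : List String) (c : String) (h : c ≠ ".") :
    compactRec ("." :: (t₀ ++ [c])) = c :: compactRec t₀ ++ ["."] := by
  conv_lhs => rw [compactRec.eq_def]
  simp [List.dropLast_concat]
  split
  · rename_i heq; rw [List.getLast?_concat] at heq; cases heq
  · rename_i c' heq
    rw [List.getLast?_concat] at heq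
    injection heq with heq'
    simp [← heq', h]

theorem set_len_append (u : List String) (x y : String) (v : List String) :
    (u ++ x :: v).set u.length y = u ++ y :: v := by
  induction u with
  | nil => simp
  | cons h t ih => simp [ih]

theorem loopA_compact (n : ℕ) (mid pre suf : List String) (hlen : mid.length = n) :
    loopA (pre ++ mid ++ suf) (pre.length : Int) ((pre.length : Int) + (mid.length : Int) - 1)
      = pre ++ compactRec mid ++ suf := by
  induction n using Nat.strong_induction_on generalizing mid pre suf with
  | _ n ih =>
  rcases mid with _ | ⟨a, T⟩
  · rw [loopA, dif_neg (by simp only [List.length_nil, Nat.cast_zero]; omega)]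
    rw [compact_nil]
  rcases List.eq_nil_or_concat T with rfl | ⟨t₀, c, rfl⟩
  · rw [loopA, dif_neg (by simp only [List.length_cons, List.length_nil]; push_cast; omega)]
    rw [compact_single]
  simp only [List.concat_eq_append] at hlen ⊢
  have hij : (pre.length : Int) < (pre.length : Int) + ((a :: (t₀ ++ [c])).length : Int) - 1 := by
    simp only [List.length_cons, List.length_append, List.length_nil]; push_cast; omega
  by_cases ha : a = "."
  · subst ha
    by_cases hc : c = "."
    · subst hc
      -- last element is "." : peel it off on the right
      have hgj : getl (pre ++ ("." :: (t₀ ++ ["."])) ++ suf)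
          ((pre.length : Int) + (("." :: (t₀ ++ ["."])).length : Int) - 1) = "." := by
        have h0 := getl_append (pre ++ "." :: t₀) "." suf
        have harg : ((pre ++ "." :: t₀).length : Int)
            = (pre.length : Int) + (("." :: (t₀ ++ ["."])).length : Int) - 1 := by
          simp only [List.length_append, List.length_cons, List.length_nil]; push_cast; omega
        rw [harg] at h0
        simpa using h0
      rw [peel_right _ _ _ hij hgj]
      have key := ih ("." :: t₀).length (by simp at hlen ⊢; omega) ("." :: t₀) pre ("." :: suf) rfl
      have harg2 : (pre.length : Int) + (("." :: t₀).length : Int) - 1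
          = (pre.length : Int) + (("." :: (t₀ ++ ["."])).length : Int) - 1 - 1 := by
        simp only [List.length_cons, List.length_append, List.length_nil]; push_cast; omega
      rw [harg2] at key
      simp only [List.append_assoc, List.cons_append, List.nil_append] at key ⊢
      rw [key, compact_dot_dot]
      simp
    · -- swap step
      have hgi : getl (pre ++ ("." :: (t₀ ++ [c])) ++ suf) (pre.length : Int) = "." := by
        have h0 := getl_append pre "." (t₀ ++ [c] ++ suf)
        simpa using h0
      have hgj : getl (pre ++ ("." :: (t₀ ++ [c])) ++ suf)
          ((pre.length : Int) + (("." :: (t₀ ++ [c])).length : Int) - 1) = c := by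
        have h0 := getl_append (pre ++ "." :: t₀) c suf
        have harg : ((pre ++ "." :: t₀).length : Int)
            = (pre.length : Int) + (("." :: (t₀ ++ [c])).length : Int) - 1 := by
          simp only [List.length_append, List.length_cons, List.length_nil]; push_cast; omega
        rw [harg] at h0
        simpa using h0
      set L := pre ++ ("." :: (t₀ ++ [c])) ++ suf with hL
      set j : Int := (pre.length : Int) + (("." :: (t₀ ++ [c])).length : Int) - 1 with hjdef
      have hI : advI L j (pre.length : Int) = (pre.length : Int) := by
        rw [advI]; exact dif_neg (fun hcc => absurd hgi hcc.1)
      have hJ : advJ L (pre.length : Int) j = j := by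
        rw [advJ]; exact dif_neg (fun hcc => absurd (hgj ▸ hcc.1) hc)
      rw [loopA, dif_pos hij]
      simp only [hI, hJ]
      rw [if_pos ⟨hgi, by rw [hgj]; exact hc, by omega⟩]
      -- compute the updated list
      have hset : PySem.List.pySetD (PySem.List.pySetD L (pre.length : Int) (getl L j)) j "."
          = (pre ++ [c]) ++ t₀ ++ ("." :: suf) := by
        rw [hgj]
        have e1 : PySem.List.pySetD L (pre.length : Int) c = (pre ++ c :: t₀) ++ c :: suf := by
          rw [PySem.List.pySetD_natCast]
          have : L = pre ++ "." :: (t₀ ++ c :: suf) := by simp [hL]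
          rw [this, set_len_append]
          simp
        rw [e1]
        have harg : j = (((pre ++ c :: t₀).length : Nat) : Int) := by
          simp only [hjdef, List.length_append, List.length_cons, List.length_nil]
          push_cast; omega
        rw [harg, PySem.List.pySetD_natCast, set_len_append]
        simp
      rw [hset]
      have key := ih t₀.length (by simp at hlen ⊢; omega) t₀ (pre ++ [c]) ("." :: suf) rfl
      have hi2 : ((pre ++ [c]).length : Int) = (pre.length : Int) + 1 := by
        simp
      have hj2 : ((pre ++ [c]).length : Int) + (t₀.length : Int) - 1 = j - 1 := by
        simp only [hjdef, List.length_append, List.length_cons, List.length_nil]; push_cast; omega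
      rw [hj2, hi2] at key
      rw [key, compact_dot_block _ _ hc]
      simp
  · -- head is a block: peel it off on the left
    have hgi : getl (pre ++ (a :: (t₀ ++ [c])) ++ suf) (pre.length : Int) = a := by
      have h0 := getl_append pre a (t₀ ++ [c] ++ suf)
      simpa using h0
    rw [peel_left _ _ _ hij (by rw [hgi]; exact ha)]
    have key := ih (t₀ ++ [c]).length (by simp at hlen ⊢; omega) (t₀ ++ [c]) (pre ++ [a]) suf rfl
    have hi2 : ((pre ++ [a]).length : Int) = (pre.length : Int) + 1 := by simp
    have hj2 : ((pre ++ [a]).length : Int) + ((t₀ ++ [c]).length : Int) - 1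
        = (pre.length : Int) + ((a :: (t₀ ++ [c])).length : Int) - 1 := by
      simp only [List.length_append, List.length_cons, List.length_nil]; push_cast; omega
    rw [hj2, hi2] at key
    simp only [List.append_assoc, List.cons_append, List.nil_append] at key ⊢
    rw [key, compact_cons _ _ ha]
    simp

theorem A_eq_compact (l : List String) : move_blocks_from_right l = compactRec l := by
  have h := loopA_compact l.length l [] [] rfl
  simpa [move_blocks_from_right] using h

-- ---- closed form of B's port ----
def stepE (st : List String × List String) (x : String) : List String × List String :=
  if x ≠ "." then (st.1 ++ [x], st.2)
  else
    match PySem.List.pop? st.2 (-1) with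
    | some (b, rest) => (st.1 ++ [b], rest)
    | none => (st.1 ++ [x], st.2)

def fillGo : List String → List String → List String
  | [], _ => []
  | x :: xs, mv =>
    if x ≠ "." then x :: fillGo xs mv
    else
      match PySem.List.pop? mv (-1) with
      | some (b, rest) => b :: fillGo xs rest
      | none => x :: fillGo xs mv

def cntB (l : List String) : Nat := l.countP (fun x => x ≠ ".")
def movB (l : List String) : List String := (l.drop (cntB l)).filter (fun x => x ≠ ".")
def Bfun (l : List String) : List String :=
  fillGo (l.take (cntB l)) (movB l) ++ List.replicate (l.length - cntB l) "."

theorem foldl_cnt (l : List String) : ∀ (a : Int),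
    l.foldl (fun acc x => if x ≠ "." then acc + 1 else acc) a = a + (cntB l : Int) := by
  induction l with
  | nil => intro a; simp [cntB]
  | cons x xs ih =>
    intro a
    rw [List.foldl_cons]
    by_cases hx : x = "."
    · rw [if_neg (not_not_intro hx), ih]
      simp [cntB, List.countP_cons, hx]
    · rw [if_pos hx, ih]
      simp [cntB, List.countP_cons, hx]
      push_cast
      ring

theorem stepB_getD (l : List String) (st : List String × List String) (k : Nat) :
    stepB l st (k : Int) = stepE st (l.getD k "") := by
  simp [stepB, stepE, PySem.List.pyGetD_natCast]

theorem foldl_range_getD (m : Nat) (l : List String) (hm : m ≤ l.length)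
    (s : List String × List String) :
    (List.range m).foldl (fun st k => stepE st (l.getD k "")) s = (l.take m).foldl stepE s := by
  induction m with
  | zero => simp
  | succ m ih =>
    have hm' : m < l.length := by omega
    have hg : l[m]? = some (l.getD m "") := by
      rw [List.getElem?_eq_getElem hm', List.getD_eq_getElem l "" hm']
    rw [List.range_succ, List.foldl_append, ih (by omega), List.take_succ, hg]
    simp only [Option.toList_some, List.foldl_append, List.foldl_cons, List.foldl_nil]

theorem foldl_stepE_fst : ∀ (xs built mv : List String),
    (xs.foldl stepE (built, mv)).1 = built ++ fillGo xs mv := by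
  intro xs
  induction xs with
  | nil => intro built mv; simp [fillGo]
  | cons x xs ih =>
    intro built mv
    by_cases hx : x = "."
    · rcases hp : PySem.List.pop? mv (-1) with _ | ⟨b, rest⟩ <;>
        simp [List.foldl_cons, stepE, fillGo, hx, hp, ih]
    · simp [List.foldl_cons, stepE, fillGo, hx, ih]

theorem Balt_closed (l : List String) : move_blocks_from_right_alt l = Bfun l := by
  have hcle : cntB l ≤ l.length := List.countP_le_length
  unfold move_blocks_from_right_alt
  rw [foldl_cnt l 0]
  simp only [zero_add]
  rw [PySem.List.slice_from_natCast, PySem.List.pyRange_one]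
  simp only [Int.sub_zero, Int.toNat_natCast]
  rw [List.foldl_map]
  simp only [zero_add, stepB_getD]
  rw [foldl_range_getD (cntB l) l hcle]
  rw [foldl_stepE_fst]
  have hrep : (((l.length : Int) - (cntB l : Int))).toNat = l.length - cntB l := by omega
  rw [hrep]
  simp [Bfun, movB]

-- ---- Bfun satisfies compactRec's equations ----
theorem Bfun_cons (a : String) (t : List String) (ha : a ≠ ".") :
    Bfun (a :: t) = a :: Bfun t := by
  have h1 : cntB (a :: t) = cntB t + 1 := by simp [cntB, List.countP_cons, ha]
  have h2 : movB (a :: t) = movB t := by rw [movB, movB, h1, List.drop_succ_cons]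
  have h5 : (a :: t).length - (cntB t + 1) = t.length - cntB t := by simp
  rw [Bfun, Bfun, h1, h2, h5, List.take_succ_cons]
  simp [fillGo, ha]

theorem Bfun_dot_end (u : List String) : Bfun (u ++ ["."]) = Bfun u ++ ["."] := by
  have hcle : cntB u ≤ u.length := List.countP_le_length
  have h1 : cntB (u ++ ["."]) = cntB u := by simp [cntB, List.countP_append]
  have h2 : movB (u ++ ["."]) = movB u := by
    simp [movB, h1, List.drop_append_of_le_length hcle]
  have h3 : (u ++ ["."]).take (cntB u) = u.take (cntB u) :=
    List.take_append_of_le_length hcle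
  have h4 : (u ++ ["."]).length - cntB (u ++ ["."]) = (u.length - cntB u) + 1 := by
    simp [h1]; omega
  rw [Bfun, h4, h2, h1, h3, List.replicate_succ']
  simp [Bfun]

theorem Bfun_dot_block (t₀ : List String) (c : String) (hc : c ≠ ".") :
    Bfun ("." :: (t₀ ++ [c])) = c :: Bfun t₀ ++ ["."] := by
  have hcle : cntB t₀ ≤ t₀.length := List.countP_le_length
  have h1 : cntB ("." :: (t₀ ++ [c])) = cntB t₀ + 1 := by
    simp [cntB, List.countP_cons, List.countP_append, hc]
  have h2 : movB ("." :: (t₀ ++ [c])) = movB t₀ ++ [c] := by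
    rw [movB, h1, List.drop_succ_cons, List.drop_append_of_le_length hcle, List.filter_append]
    simp [movB, hc]
  have h3 : ("." :: (t₀ ++ [c])).take (cntB ("." :: (t₀ ++ [c]))) = "." :: t₀.take (cntB t₀) := by
    rw [h1, List.take_succ_cons, List.take_append_of_le_length hcle]
  have hpop : PySem.List.pop? (movB t₀ ++ [c]) (-1) = some (c, movB t₀) := PySem.List.pop?_last _ _
  have h4 : ("." :: (t₀ ++ [c])).length - cntB ("." :: (t₀ ++ [c])) = (t₀.length - cntB t₀) + 1 := by
    simp [h1]; omega
  rw [Bfun, h4, h2, h3, List.replicate_succ']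
  simp [fillGo, hpop, Bfun]

theorem Bfun_eq_compact (n : ℕ) (l : List String) (hlen : l.length = n) :
    Bfun l = compactRec l := by
  induction n using Nat.strong_induction_on generalizing l with
  | _ n ih =>
  rcases l with _ | ⟨a, T⟩
  · simp [Bfun, cntB, movB, fillGo, compact_nil]
  rcases List.eq_nil_or_concat T with rfl | ⟨t₀, c, rfl⟩
  · rw [compact_single]
    by_cases ha : a = "."
    · subst ha
      have := Bfun_dot_end []
      simpa [Bfun, cntB, movB, fillGo] using this
    · rw [Bfun_cons a [] ha]
      simp [Bfun, cntB, movB, fillGo]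
  simp only [List.concat_eq_append] at hlen ⊢
  by_cases ha : a = "."
  · subst ha
    by_cases hc : c = "."
    · subst hc
      have key := ih ("." :: t₀).length (by simp at hlen ⊢; omega) ("." :: t₀) rfl
      calc Bfun ("." :: (t₀ ++ ["."]))
          = Bfun (("." :: t₀) ++ ["."]) := by simp
        _ = Bfun ("." :: t₀) ++ ["."] := Bfun_dot_end _
        _ = compactRec ("." :: t₀) ++ ["."] := by rw [key]
        _ = compactRec ("." :: (t₀ ++ ["."])) := (compact_dot_dot t₀).symm
    · have key := ih t₀.length (by simp at hlen ⊢; omega) t₀ rfl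
      rw [Bfun_dot_block t₀ c hc, key, compact_dot_block t₀ c hc]
  · have key := ih (t₀ ++ [c]).length (by simp at hlen ⊢; omega) (t₀ ++ [c]) rfl
    rw [Bfun_cons a _ ha, key, compact_cons a _ ha]

theorem B_eq_compact (l : List String) : move_blocks_from_right_alt l = compactRec l := by
  rw [Balt_closed, Bfun_eq_compact l.length l rfl]

-- ===== VERDICT (by name: the statement is the Claim_ definition above) =====
theorem move_blocks_from_right_spec : Claim_equal_move_blocks_from_right := by
  intro l _
  unfold Spec_move_blocks_from_right
  rw [A_eq_compact, B_eq_compact]
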